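-- pv_equiv track=rewrite | github.com/johnny-paixao/brz-cards | src/collectors/export_faceit_season8_stats.py | longest_win_streak
-- ===== SOURCE A (Python) =====
-- def longest_win_streak(results: list[str]) -> int:
--     best = 0
--     current = 0
--
--     for result in results:
--         if result == "1":
--             current += 1
--             best = max(best, current)
--         else:
--             current = 0
--
--     return best
-- ===== SOURCE B (Python) =====
-- def longest_win_streak(results: list[str]) -> int:
--     # groupby-style decomposition: build the maximal runs first, then pick
--     # the longest run of "1"s.
--     runs = []  # list of [value, run_length]
--     for r in results:
--         if runs and runs[-1][0] == r:
--             runs[-1][1] += 1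
--         else:
--             runs.append([r, 1])
--     wins = [n for k, n in runs if k == "1"]
--     return max(wins) if wins else 0
-- ===== Notes on version B (the rewrite author's own statement) =====
-- stated objective: alternative
-- what changed: Replaced the running-counter/best-so-far pass with a build-maximal-runs-then-select-max decomposition (groupby-style): the list is first partitioned into runs of consecutive equal values, then the answer is the maximum length among the runs whose value is "1" (0 if there are none).
import Mathlib
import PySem

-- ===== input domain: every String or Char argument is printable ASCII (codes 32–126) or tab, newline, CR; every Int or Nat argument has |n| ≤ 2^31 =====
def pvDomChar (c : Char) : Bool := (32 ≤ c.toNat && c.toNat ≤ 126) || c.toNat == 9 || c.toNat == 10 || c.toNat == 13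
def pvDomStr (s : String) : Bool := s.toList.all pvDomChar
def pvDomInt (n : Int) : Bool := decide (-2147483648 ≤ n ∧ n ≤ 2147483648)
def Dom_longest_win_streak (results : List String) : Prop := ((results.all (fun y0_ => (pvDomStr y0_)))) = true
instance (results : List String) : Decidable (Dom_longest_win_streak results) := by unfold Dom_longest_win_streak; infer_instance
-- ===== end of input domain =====

-- B differs only in structure (runs-then-max instead of a running counter); same value on every input.

-- ===== PORT A =====
-- the for-loop over results carrying (best, current)
def pvALoop : List String → Int → Int → Int
  | [], best, _ => best
  | r :: rest, best, current =>
    if r == "1" then pvALoop rest (max best (current + 1)) (current + 1)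
    else pvALoop rest best 0

def longest_win_streak (results : List String) : Int := pvALoop results 0 0

-- ===== PORT B =====
-- one step of B's run-building loop: extend the last run or start a new one
def pvAddRun (runs : List (String × Int)) (r : String) : List (String × Int) :=
  match runs.getLast? with
  | some (k, n) => if k == r then runs.dropLast ++ [(k, n + 1)] else runs ++ [(r, 1)]
  | none => [(r, 1)]

def longest_win_streak_alt (results : List String) : Int :=
  let runs := results.foldl pvAddRun []
  let wins := runs.filterMap (fun p => if p.1 == "1" then some p.2 else none)
  match PySem.List.max? wins (fun x => x) with
  | some m => m
  | none => 0

-- ===== PRECONDITION & SPEC =====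
def Spec_longest_win_streak (results : List String) (out : Int) : Prop := out = longest_win_streak_alt results
instance (results : List String) (out : Int) : Decidable (Spec_longest_win_streak results out) := by unfold Spec_longest_win_streak; infer_instance

-- ===== CLAIM (what is proved, stated in full; the proofs are below) =====
def Claim_equal_longest_win_streak : Prop := ∀ (results : List String), Dom_longest_win_streak results → Spec_longest_win_streak results (longest_win_streak results)

-- ===== LEMMAS AND PROOFS =====

-- the value B computes from a runs list
def pvMW (rs : List (String × Int)) : Int :=
  match PySem.List.max? (rs.filterMap (fun p => if p.1 == "1" then some p.2 else none)) (fun x => x) with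
  | some m => m
  | none => 0

lemma pvMW_concat (rs : List (String × Int)) (k : String) (n : Int) (hn : 1 ≤ n) :
    pvMW (rs ++ [(k, n)]) = if k = "1" then max (pvMW rs) n else pvMW rs := by
  unfold pvMW
  rw [List.filterMap_append]
  have hsel : List.filterMap (fun p : String × Int => if p.1 == "1" then some p.2 else none) [(k, n)]
      = (if k = "1" then [n] else []) := by
    by_cases hk : k = "1" <;> simp [hk]
  rw [hsel]
  by_cases hk : k = "1"
  · rw [if_pos hk, if_pos hk]
    cases hws : List.filterMap (fun p : String × Int => if p.1 == "1" then some p.2 else none) rs with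
    | nil =>
      rw [List.nil_append,
        show PySem.List.max? ([n] : List Int) (fun y => y) = some n from by
          rw [PySem.List.max?_id_cons, List.foldl_nil],
        show PySem.List.max? ([] : List Int) (fun y => y) = none from rfl]
      show n = max 0 n
      rw [max_eq_right (show (0 : Int) ≤ n by omega)]
    | cons x t =>
      rw [show (x :: t) ++ [n] = x :: (t ++ [n]) from rfl, PySem.List.max?_id_cons,
        PySem.List.max?_id_cons]
      show List.foldl max x (t ++ [n]) = max (List.foldl max x t) n
      rw [List.foldl_append]
      rfl
  · rw [if_neg hk, if_neg hk, List.append_nil]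

lemma pvMain (l : List String) : ∀ (rs : List (String × Int)) (k : String) (n best current : Int),
    1 ≤ n →
    best = pvMW (rs ++ [(k, n)]) →
    current = (if k = "1" then n else 0) →
    pvALoop l best current = pvMW (List.foldl pvAddRun (rs ++ [(k, n)]) l) := by
  induction l with
  | nil => intro rs k n best current _ hb _; simpa [pvALoop] using hb
  | cons x xs ih =>
    intro rs k n best current hn hb hc
    have hdrop : (rs ++ [(k, n)]).dropLast = rs := by simp
    have hadd : pvAddRun (rs ++ [(k, n)]) x
        = if k = x then rs ++ [(k, n + 1)] else (rs ++ [(k, n)]) ++ [(x, 1)] := by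
      unfold pvAddRun
      rw [show (rs ++ [(k, n)]).getLast? = some (k, n) by simp]
      by_cases hkx : k = x <;> simp [hkx]
    rw [show List.foldl pvAddRun (rs ++ [(k, n)]) (x :: xs)
        = List.foldl pvAddRun (pvAddRun (rs ++ [(k, n)]) x) xs from rfl, hadd]
    by_cases hx : x = "1"
    · subst hx
      rw [show pvALoop ("1" :: xs) best current
          = pvALoop xs (max best (current + 1)) (current + 1) by simp [pvALoop]]
      by_cases hkx : k = "1"
      · subst hkx
        rw [if_pos rfl]
        apply ih rs "1" (n + 1) _ _ (by omega)
        · have hcur : current = n := by rw [hc, if_pos rfl]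
          rw [hb, pvMW_concat rs "1" n hn, pvMW_concat rs "1" (n + 1) (by omega),
            if_pos rfl, if_pos rfl, hcur, max_assoc, max_eq_right (show n ≤ n + 1 by omega)]
        · simp [hc]
      · rw [if_neg hkx]
        apply ih (rs ++ [(k, n)]) "1" 1 _ _ le_rfl
        · have hcur : current = 0 := by rw [hc, if_neg hkx]
          rw [pvMW_concat (rs ++ [(k, n)]) "1" 1 le_rfl, if_pos rfl, ← hb, hcur,
            show (0 : Int) + 1 = 1 from rfl]
        · simp [hc, hkx]
    · rw [show pvALoop (x :: xs) best current = pvALoop xs best 0 by simp [pvALoop, hx]]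
      by_cases hkx : k = x
      · subst hkx
        rw [if_pos rfl]
        apply ih rs k (n + 1) _ _ (by omega)
        · rw [hb, pvMW_concat rs k n hn, pvMW_concat rs k (n + 1) (by omega),
            if_neg hx, if_neg hx]
        · rw [if_neg hx]
      · rw [if_neg hkx]
        apply ih (rs ++ [(k, n)]) x 1 _ _ le_rfl
        · rw [pvMW_concat (rs ++ [(k, n)]) x 1 le_rfl, if_neg hx, hb]
        · rw [if_neg hx]

-- ===== VERDICT (by name: the statement is the Claim_ definition above) =====
theorem longest_win_streak_spec : Claim_equal_longest_win_streak := by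
  intro results _
  unfold Spec_longest_win_streak longest_win_streak longest_win_streak_alt
  cases results with
  | nil => decide
  | cons x xs =>
    show pvALoop (x :: xs) 0 0 = pvMW (List.foldl pvAddRun [] (x :: xs))
    rw [show List.foldl pvAddRun [] (x :: xs) = List.foldl pvAddRun ([] ++ [(x, 1)]) xs
        by simp [pvAddRun]]
    by_cases hx : x = "1"
    · subst hx
      rw [show pvALoop ("1" :: xs) 0 0 = pvALoop xs (max 0 1) 1 by simp [pvALoop]]
      apply pvMain xs [] "1" 1 _ _ le_rfl
      · rw [pvMW_concat [] "1" 1 le_rfl, if_pos rfl]; decide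
      · simp
    · rw [show pvALoop (x :: xs) 0 0 = pvALoop xs 0 0 by simp [pvALoop, hx]]
      apply pvMain xs [] x 1 _ _ le_rfl
      · rw [pvMW_concat [] x 1 le_rfl, if_neg hx]; decide
      · rw [if_neg hx]
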